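-- pv_equiv track=rewrite | github.com/manvithaOnGit/Image-Steganography-Using-RaspBerryPie | codons1.py | text_to_codons
-- ===== SOURCE A (Python) =====
-- from typing import List
--
-- BITS_TO_BASE = {"00": "A", "01": "T", "10": "G", "11": "C"}
--
-- def _bytes_to_bitstring(b: bytes) -> str:
--     return "".join(f"{byte:08b}" for byte in b)
--
-- def _bits_to_codon(bits6: str) -> str:
--     # bits6 must be exactly 6 bits
--     return (
--         BITS_TO_BASE[bits6[0:2]] +
--         BITS_TO_BASE[bits6[2:4]] +
--         BITS_TO_BASE[bits6[4:6]]
--     )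
--
-- def text_to_codons(text: str) -> List[str]:
--     """
--     Encode UTF-8 text to a list of DNA codons (strings of length 3).
--     The first codon is a header that stores the number of pad bits (0..5).
--     """
--     data = text.encode("utf-8")
--     bitstr = _bytes_to_bitstring(data)
--
--     # Pad to multiple of 6 bits (codon = 6 bits)
--     pad = (6 - (len(bitstr) % 6)) % 6
--     if pad:
--         bitstr_padded = bitstr + ("0" * pad)
--     else:
--         bitstr_padded = bitstr
--
--     # Header: store pad (0..5) in 6 bits
--     header_bits = f"{pad:06b}"
--     codons = [_bits_to_codon(header_bits)]
--
--     # Data codons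
--     for i in range(0, len(bitstr_padded), 6):
--         codons.append(_bits_to_codon(bitstr_padded[i:i+6]))
--
--     return codons
-- ===== SOURCE B (Python) =====
-- _BASES = ('A', 'T', 'G', 'C')
--
-- def _codon(v):
--     # v is a 6-bit value; split into three 2-bit base digits
--     q, b2 = divmod(v, 4)
--     b0, b1 = divmod(q, 4)
--     return _BASES[b0] + _BASES[b1] + _BASES[b2]
--
-- def text_to_codons(text):
--     data = text.encode("utf-8")
--     total = 8 * len(data)
--     pad = (6 - total % 6) % 6
--     value = 0
--     for byte in data:
--         value = value * 256 + byte
--     value *= 2 ** pad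
--     out = []
--     for _ in range((total + pad) // 6):
--         value, low = divmod(value, 64)
--         out.append(_codon(low))
--     out.append(_codon(pad))
--     out.reverse()
--     return out
-- ===== Notes on version B (the rewrite author's own statement) =====
-- stated objective: alternative
-- what changed: B never builds the intermediate bitstring: it folds the bytes into one big integer, multiplies by 2^pad, then peels 6-bit codons off the low end with divmod and reverses, instead of A's string of '0'/'1' characters sliced into 6-character chunks mapped through a bit-pair dict.
import Mathlib
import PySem

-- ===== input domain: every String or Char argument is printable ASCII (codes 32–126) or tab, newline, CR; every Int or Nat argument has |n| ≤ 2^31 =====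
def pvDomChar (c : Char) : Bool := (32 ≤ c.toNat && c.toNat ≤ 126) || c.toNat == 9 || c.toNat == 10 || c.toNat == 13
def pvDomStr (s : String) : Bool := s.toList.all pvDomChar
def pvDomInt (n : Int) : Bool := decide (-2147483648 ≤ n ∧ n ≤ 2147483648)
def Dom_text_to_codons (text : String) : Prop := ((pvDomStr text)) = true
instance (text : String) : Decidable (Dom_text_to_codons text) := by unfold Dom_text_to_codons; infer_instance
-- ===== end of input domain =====

-- B replaces A's intermediate bitstring with a single big integer: one multiply-accumulate pass
-- over the bytes, then 6-bit groups peeled off the low end and the list reversed (objective: alternative).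

-- ===== PORT A =====
-- BITS_TO_BASE: dict from 2-character bit strings to one base character
-- (Python's 1-character strings are ported as Char; '+' of three of them as String.ofList, exact on ASCII).
def pvBitsToBase : PySem.Dict (List Char) Char :=
  PySem.Dict.ofList [(['0','0'], 'A'), (['0','1'], 'T'), (['1','0'], 'G'), (['1','1'], 'C')]

-- f"{byte:08b}": the 8 bits of the byte, most significant first
def pvByteBits (b : Nat) : List Char :=
  (List.range 8).map (fun k => if b.testBit (7 - k) then '1' else '0')

-- _bits_to_codon; the dict default is unreachable (2-char slices of a '0'/'1' string are always keys)
def pvBitsToCodon (bits6 : List Char) : String :=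
  String.ofList
    [ PySem.Dict.getD pvBitsToBase (PySem.List.slice bits6 (some 0) (some 2)) 'A',
      PySem.Dict.getD pvBitsToBase (PySem.List.slice bits6 (some 2) (some 4)) 'A',
      PySem.Dict.getD pvBitsToBase (PySem.List.slice bits6 (some 4) (some 6)) 'A' ]

-- text.encode('utf-8') is one byte per character on Dom (ASCII ≤ 126), so data = the code points
def text_to_codons (text : String) : List String :=
  let data : List Nat := text.toList.map (fun c => c.toNat)
  let bitstr : List Char := (data.map pvByteBits).flatten          -- _bytes_to_bitstring
  let pad : Nat := (6 - bitstr.length % 6) % 6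
  let padded : List Char := if pad ≠ 0 then bitstr ++ List.replicate pad '0' else bitstr
  let headerBits : List Char := (List.range 6).map (fun k => if pad.testBit (5 - k) then '1' else '0')  -- f"{pad:06b}"
  (PySem.List.pyRange 0 (padded.length : Int) 6).foldl
    (fun acc i => acc ++ [pvBitsToCodon (PySem.List.slice padded (some i) (some (i + 6)))])
    [pvBitsToCodon headerBits]

-- ===== PORT B =====
def pvBases : List Char := ['A', 'T', 'G', 'C']

-- _codon: three 2-bit digits of a 6-bit value; tuple indexing never out of range (digits < 4)
def pvCodonAlt (v : Nat) : String :=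
  let q1 := v / 4
  let b2 := v % 4
  let b0 := q1 / 4
  let b1 := q1 % 4
  String.ofList [pvBases.getD b0 'A', pvBases.getD b1 'A', pvBases.getD b2 'A']

-- the for-loop: n times append the codon of the low 6 bits, then shift them out
def pvPeel : Nat → Nat → List String → List String
  | 0, _, out => out
  | n + 1, v, out => pvPeel n (v / 64) (out ++ [pvCodonAlt (v % 64)])

def text_to_codons_alt (text : String) : List String :=
  let data : List Nat := text.toList.map (fun c => c.toNat)       -- text.encode('utf-8'), exact on Dom
  let total : Nat := 8 * data.length
  let pad : Nat := (6 - total % 6) % 6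
  let value : Nat := (data.foldl (fun v b => v * 256 + b) 0) * 2 ^ pad
  let out : List String := pvPeel ((total + pad) / 6) value []
  (out ++ [pvCodonAlt pad]).reverse

-- ===== PRECONDITION & SPEC =====
def Spec_text_to_codons (text : String) (out : List String) : Prop := out = text_to_codons_alt text
instance (text : String) (out : List String) : Decidable (Spec_text_to_codons text out) := by unfold Spec_text_to_codons; infer_instance

-- ===== CLAIM (what is proved, stated in full; the proofs are below) =====
def Claim_equal_text_to_codons : Prop := ∀ (text : String), Dom_text_to_codons text → Spec_text_to_codons text (text_to_codons text)

-- ===== LEMMAS AND PROOFS =====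

-- the numeric value of a bit string (most significant first), folded from an initial accumulator
def pvVal (a : Nat) (l : List Char) : Nat :=
  l.foldl (fun x c => 2 * x + (if c = '1' then 1 else 0)) a

lemma pvVal_append (a : Nat) (l r : List Char) : pvVal a (l ++ r) = pvVal (pvVal a l) r := by
  simp [pvVal, List.foldl_append]

lemma pvVal_shift (a : Nat) (l : List Char) : pvVal a l = a * 2 ^ l.length + pvVal 0 l := by
  induction l generalizing a with
  | nil => simp [pvVal]
  | cons c cs ih =>
    have h1 : pvVal a (c :: cs) = pvVal (2 * a + (if c = '1' then 1 else 0)) cs := rfl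
    have h2 : pvVal 0 (c :: cs) = pvVal (if c = '1' then 1 else 0) cs := by simp [pvVal]
    rw [h1, h2, ih, ih (if c = '1' then 1 else 0)]
    simp only [List.length_cons, pow_succ]
    split_ifs <;> ring

lemma pvVal_lt (l : List Char) (h : ∀ c ∈ l, c = '0' ∨ c = '1') : pvVal 0 l < 2 ^ l.length := by
  induction l with
  | nil => simp [pvVal]
  | cons c cs ih =>
    have h2 : pvVal 0 (c :: cs) = pvVal (if c = '1' then 1 else 0) cs := by simp [pvVal]
    rw [h2, pvVal_shift]
    have hb : (if c = '1' then 1 else 0) ≤ 1 := by split <;> omega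
    have := ih (fun x hx => h x (by simp [hx]))
    have hp : (if c = '1' then 1 else 0) * 2 ^ cs.length ≤ 2 ^ cs.length := by
      split <;> simp
    simp only [List.length_cons, pow_succ]
    omega

lemma pvVal_replicate_zero (p : Nat) : pvVal 0 (List.replicate p '0') = 0 := by
  induction p with
  | zero => rfl
  | succ n ih => simpa [pvVal, List.replicate_succ] using ih

lemma pvByteBits_length (b : Nat) : (pvByteBits b).length = 8 := by simp [pvByteBits]

lemma pvByteBits_binary (b : Nat) : ∀ c ∈ pvByteBits b, c = '0' ∨ c = '1' := by
  intro c hc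
  simp only [pvByteBits, List.mem_map, List.mem_range] at hc
  obtain ⟨k, _, hk⟩ := hc
  split at hk
  · exact Or.inr hk.symm
  · exact Or.inl hk.symm

set_option maxRecDepth 8000 in
lemma pvVal_byteBits (b : Nat) (hb : b < 256) : pvVal 0 (pvByteBits b) = b := by
  revert hb; revert b; decide

lemma pvVal_flatten (bs : List Nat) (a : Nat) (h : ∀ b ∈ bs, b < 256) :
    pvVal a ((bs.map pvByteBits).flatten) = bs.foldl (fun v b => v * 256 + b) a := by
  induction bs generalizing a with
  | nil => simp [pvVal]
  | cons b rest ih =>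
    simp only [List.map_cons, List.flatten_cons, List.foldl_cons]
    rw [pvVal_append, pvVal_shift a, pvByteBits_length, pvVal_byteBits b (h b (by simp))]
    have h28 : a * 2 ^ 8 + b = a * 256 + b := by norm_num
    rw [h28, ih _ (fun x hx => h x (by simp [hx]))]

lemma pvPeel_eq_map (n : Nat) (v : Nat) (out : List String) :
    pvPeel n v out = out ++ (List.range n).map (fun i => pvCodonAlt (v / 64 ^ i % 64)) := by
  induction n generalizing v out with
  | zero => simp [pvPeel]
  | succ n ih =>
    rw [pvPeel, ih, List.range_succ_eq_map, List.map_cons, List.map_map]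
    simp only [Function.comp_def, pow_zero, Nat.div_one, List.append_assoc, List.singleton_append]
    congr 2
    exact List.map_congr_left (fun i _ => by
      rw [Nat.div_div_eq_div_mul, ← pow_succ'])

lemma pvPair_eq (x y : Char) (hx : x = '0' ∨ x = '1') (hy : y = '0' ∨ y = '1') :
    PySem.Dict.getD pvBitsToBase [x, y] 'A'
      = pvBases.getD (2 * (if x = '1' then 1 else 0) + (if y = '1' then 1 else 0)) 'A' := by
  rcases hx with rfl | rfl <;> rcases hy with rfl | rfl <;> decide

lemma pvDigits (va vb vc vd ve vf : Nat)
    (h : va ≤ 1 ∧ vb ≤ 1 ∧ vc ≤ 1 ∧ vd ≤ 1 ∧ ve ≤ 1 ∧ vf ≤ 1) :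
    (32*va+16*vb+8*vc+4*vd+2*ve+vf)/4/4 = 2*va+vb ∧
    (32*va+16*vb+8*vc+4*vd+2*ve+vf)/4%4 = 2*vc+vd ∧
    (32*va+16*vb+8*vc+4*vd+2*ve+vf)%4 = 2*ve+vf := by omega

lemma pvCodon_eq (l : List Char) (hlen : l.length = 6) (hb : ∀ c ∈ l, c = '0' ∨ c = '1') :
    pvBitsToCodon l = pvCodonAlt (pvVal 0 l) := by
  rcases l with _ | ⟨a, _ | ⟨b, _ | ⟨c, _ | ⟨d, _ | ⟨e, _ | ⟨f, _ | ⟨g, t⟩⟩⟩⟩⟩⟩⟩ <;>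
    simp only [List.length_cons, List.length_nil] at hlen <;> try omega
  have ha := hb a (by simp); have hbb := hb b (by simp); have hc := hb c (by simp)
  have hd := hb d (by simp); have he := hb e (by simp); have hf := hb f (by simp)
  have hv : pvVal 0 [a, b, c, d, e, f]
      = 32 * (if a = '1' then 1 else 0) + 16 * (if b = '1' then 1 else 0)
        + 8 * (if c = '1' then 1 else 0) + 4 * (if d = '1' then 1 else 0)
        + 2 * (if e = '1' then 1 else 0) + (if f = '1' then 1 else 0) := by
    simp only [pvVal, List.foldl_cons, List.foldl_nil]
    generalize (if a = '1' then (1:Nat) else 0) = va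
    generalize (if b = '1' then (1:Nat) else 0) = vb
    generalize (if c = '1' then (1:Nat) else 0) = vc
    generalize (if d = '1' then (1:Nat) else 0) = vd
    generalize (if e = '1' then (1:Nat) else 0) = ve
    generalize (if f = '1' then (1:Nat) else 0) = vf
    ring
  have hs1 : PySem.List.slice [a, b, c, d, e, f] (some 0) (some 2) = [a, b] := rfl
  have hs2 : PySem.List.slice [a, b, c, d, e, f] (some 2) (some 4) = [c, d] := rfl
  have hs3 : PySem.List.slice [a, b, c, d, e, f] (some 4) (some 6) = [e, f] := rfl
  have hle : ∀ x : Char, (if x = '1' then (1:Nat) else 0) ≤ 1 := fun x => by split <;> omega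
  obtain ⟨h1, h2, h3⟩ := pvDigits (if a = '1' then 1 else 0) (if b = '1' then 1 else 0)
    (if c = '1' then 1 else 0) (if d = '1' then 1 else 0) (if e = '1' then 1 else 0)
    (if f = '1' then 1 else 0) ⟨hle a, hle b, hle c, hle d, hle e, hle f⟩
  simp only [pvBitsToCodon, pvCodonAlt, hs1, hs2, hs3, hv, h1, h2, h3,
    pvPair_eq a b ha hbb, pvPair_eq c d hc hd, pvPair_eq e f he hf]

lemma pvHeader_eq (p : Nat) (hp : p < 6) :
    pvBitsToCodon ((List.range 6).map (fun k => if p.testBit (5 - k) then '1' else '0'))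
      = pvCodonAlt p := by
  revert hp; revert p; decide

-- extracting the k-th 6-bit group (from the most significant end) of the value of a 6n-bit string
lemma pvChunk_val (P : List Char) (n k : Nat) (hlen : P.length = 6 * n) (hk : k < n)
    (hb : ∀ c ∈ P, c = '0' ∨ c = '1') :
    pvVal 0 P / 64 ^ (n - 1 - k) % 64 = pvVal 0 ((P.drop (6 * k)).take 6) := by
  have hsplit1 : P = P.take (6 * k) ++ ((P.drop (6 * k)).take 6 ++ (P.drop (6 * k)).drop 6) := by
    simp
  set A := P.take (6 * k) with hA
  set M := (P.drop (6 * k)).take 6 with hM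
  set R := (P.drop (6 * k)).drop 6 with hR
  have hAl : A.length = 6 * k := by simp [hA]; omega
  have hMl : M.length = 6 := by simp [hM]; omega
  have hRl : R.length = 6 * (n - 1 - k) := by simp [hR]; omega
  have hMb : ∀ c ∈ M, c = '0' ∨ c = '1' := fun c hc =>
    hb c (by rw [hsplit1]; simp [hc])
  have hRb : ∀ c ∈ R, c = '0' ∨ c = '1' := fun c hc =>
    hb c (by rw [hsplit1]; simp [hc])
  have hm : pvVal 0 M < 64 := by
    have := pvVal_lt M hMb; rwa [hMl] at this
  have hr : pvVal 0 R < 2 ^ (6 * (n - 1 - k)) := by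
    have := pvVal_lt R hRb; rwa [hRl] at this
  have hval : pvVal 0 P = (pvVal 0 A * 64 + pvVal 0 M) * 2 ^ (6 * (n - 1 - k)) + pvVal 0 R := by
    conv_lhs => rw [hsplit1]
    rw [pvVal_append, pvVal_append, pvVal_shift (pvVal (pvVal 0 A) M) R,
      pvVal_shift (pvVal 0 A) M, hMl, hRl]
    norm_num
  have h64 : (64 : Nat) ^ (n - 1 - k) = 2 ^ (6 * (n - 1 - k)) := by
    rw [show (64 : Nat) = 2 ^ 6 from rfl, ← pow_mul]
  rw [hval, h64]
  rw [show (pvVal 0 A * 64 + pvVal 0 M) * 2 ^ (6 * (n - 1 - k)) + pvVal 0 R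
      = 2 ^ (6 * (n - 1 - k)) * (pvVal 0 A * 64 + pvVal 0 M) + pvVal 0 R by ring,
    Nat.mul_add_div (Nat.pow_pos (by norm_num)), Nat.div_eq_of_lt hr,
    Nat.add_zero]
  omega

-- range(0, 6n, 6) as a plain List.range
lemma pvPyRange_six (n : Nat) :
    PySem.List.pyRange 0 ((6 * n : Nat) : Int) 6 = (List.range n).map (fun k => ((6 * k : Nat) : Int)) := by
  rw [PySem.List.pyRange_of_pos _ _ (by norm_num : (0:Int) < 6)]
  rcases Nat.eq_zero_or_pos n with rfl | hn
  · simp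
  · have hpos : (0 : Int) < ((6 * n : Nat) : Int) := by positivity
    rw [if_pos hpos]
    have hcount : ((((6 * n : Nat) : Int) - 0 + 6 - 1) / 6).toNat = n := by push_cast; omega
    rw [hcount]
    exact List.map_congr_left (fun k _ => by push_cast; ring)

theorem text_to_codons_spec : Claim_equal_text_to_codons := by
  intro text hdom
  unfold Spec_text_to_codons
  simp only [text_to_codons, text_to_codons_alt]
  set bs : List Nat := text.toList.map (fun c => c.toNat) with hbs
  have hby : ∀ b ∈ bs, b < 256 := by
    intro b hb
    rw [hbs] at hb
    simp only [List.mem_map] at hb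
    obtain ⟨c, hc, rfl⟩ := hb
    unfold Dom_text_to_codons pvDomStr at hdom
    rw [List.all_eq_true] at hdom
    have := hdom c hc
    unfold pvDomChar at this
    simp only [Bool.or_eq_true, Bool.and_eq_true, decide_eq_true_eq, beq_iff_eq] at this
    omega
  have hflatlen : ((bs.map pvByteBits).flatten).length = 8 * bs.length := by
    rw [List.length_flatten, List.map_map]
    have h8 : List.map (List.length ∘ pvByteBits) bs = List.map (fun _ => (8 : Nat)) bs :=
      List.map_congr_left (fun b _ => pvByteBits_length b)
    rw [h8, List.map_const', List.sum_replicate, smul_eq_mul]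
    ring
  rw [hflatlen]
  set L : Nat := bs.length with hL
  set pad : Nat := (6 - 8 * L % 6) % 6 with hpad
  set n : Nat := (8 * L + pad) / 6 with hn
  have hpadlt : pad < 6 := by omega
  have h6n : 6 * n = 8 * L + pad := by omega
  set bitstr : List Char := (bs.map pvByteBits).flatten with hbit
  have hif : (if pad ≠ 0 then bitstr ++ List.replicate pad '0' else bitstr)
      = bitstr ++ List.replicate pad '0' := by
    by_cases h : pad = 0 <;> simp [h]
  rw [hif]
  set padded : List Char := bitstr ++ List.replicate pad '0' with hP
  have hPlen : padded.length = 6 * n := by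
    rw [hP, List.length_append, List.length_replicate, hflatlen]
    omega
  have hPb : ∀ c ∈ padded, c = '0' ∨ c = '1' := by
    intro c hc
    rw [hP, List.mem_append] at hc
    rcases hc with hc | hc
    · rw [hbit, List.mem_flatten] at hc
      obtain ⟨l, hl, hcl⟩ := hc
      simp only [List.mem_map] at hl
      obtain ⟨b, _, rfl⟩ := hl
      exact pvByteBits_binary b c hcl
    · exact Or.inl (List.eq_of_mem_replicate hc)
  have hval : pvVal 0 padded = (bs.foldl (fun v b => v * 256 + b) 0) * 2 ^ pad := by
    rw [hP, pvVal_append, hbit, pvVal_flatten bs 0 hby, pvVal_shift, List.length_replicate,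
      pvVal_replicate_zero]
    ring
  -- A's loop as a map over chunks
  rw [hPlen, pvPyRange_six, List.foldl_map, PySem.List.foldl_append_singleton_eq_map]
  -- B's loop as a reversed map
  rw [pvPeel_eq_map]
  rw [pvHeader_eq pad hpadlt, ← hval]
  simp only [List.nil_append, List.reverse_append, List.reverse_cons, List.reverse_nil,
    List.nil_append, List.singleton_append]
  refine congrArg (pvCodonAlt pad :: ·) ?_
  apply List.ext_getElem
  · simp
  · intro i h1 h2
    have hi : i < n := by simpa using h1
    rw [List.getElem_reverse]
    simp only [List.getElem_map, List.getElem_range, List.length_map,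
      List.length_range]
    have hlen6 : ((padded.drop (6 * i)).take 6).length = 6 := by
      rw [List.length_take, List.length_drop, hPlen]
      omega
    have hbin6 : ∀ c ∈ (padded.drop (6 * i)).take 6, c = '0' ∨ c = '1' :=
      fun c hc => hPb c (List.mem_of_mem_drop (List.mem_of_mem_take hc))
    have hslice : PySem.List.slice padded (some ((6 * i : Nat) : Int)) (some (((6 * i : Nat) : Int) + 6))
        = (padded.drop (6 * i)).take 6 := by
      have hc : ((6 * i : Nat) : Int) + 6 = ((6 * i + 6 : Nat) : Int) := by push_cast; ring
      rw [hc, PySem.List.slice_natCast]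
      congr 1
      omega
    rw [hslice, pvCodon_eq _ hlen6 hbin6, ← pvChunk_val padded n i hPlen hi hPb]
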